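-- pv_equiv track=rewrite | github.com/Kiklkahoo/ReccurentSequence | 1.py | fib_to_n
-- ===== SOURCE A (Python) =====
-- def fib_to_n(n, nums):
--     fk1 = 0
--     fk2 = 0
--     fk3 = 0
--     itog = 0
--     dict={0:0}
--     for j in range(1, n):
--
--         if j<=2:
--             itog = j
--         else:
--             if j==3:
--                 itog = 2
--                 fk1, fk2, fk3  = itog, 2, 1
--             else:
--                 itog = fk1 + fk3
--                 fk1, fk2, fk3 = itog, fk1, fk2
--         if nums.count(j)!=0:
--             dict.update({j:itog})
--     return dict
-- ===== SOURCE B (Python) =====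
-- def fib_to_n(n, nums):
--     # Generate the full table of recurrence values, then select.
--     vals = [0, 1, 2]
--     for j in range(3, n):
--         vals.append(vals[j - 1] + vals[j - 3])
--     result = {0: 0}
--     for j in range(1, n):
--         if nums.count(j) != 0:
--             result[j] = vals[j]
--     return result
-- ===== Notes on version B (the rewrite author's own statement) =====
-- stated objective: simpler
-- what changed: Replaces the fused loop with a three-scalar sliding window (fk1/fk2/fk3 rotation and a j==3 special case) by one pass that builds a full indexed table vals[j]=vals[j-1]+vals[j-3] and a second pass that selects the requested indices.
import Mathlib
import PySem

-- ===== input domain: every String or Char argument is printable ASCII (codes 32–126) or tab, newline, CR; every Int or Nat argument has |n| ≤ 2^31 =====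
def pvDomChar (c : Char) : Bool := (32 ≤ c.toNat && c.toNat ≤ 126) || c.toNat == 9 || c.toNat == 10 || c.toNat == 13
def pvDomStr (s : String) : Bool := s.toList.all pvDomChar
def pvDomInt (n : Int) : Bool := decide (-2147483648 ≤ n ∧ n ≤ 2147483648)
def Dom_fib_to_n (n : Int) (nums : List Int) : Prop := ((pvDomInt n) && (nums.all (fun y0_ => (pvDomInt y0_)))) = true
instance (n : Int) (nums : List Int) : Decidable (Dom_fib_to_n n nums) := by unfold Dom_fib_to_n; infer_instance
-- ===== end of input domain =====

-- B builds a full indexed table vals[j] = vals[j-1] + vals[j-3] in one pass and selects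
-- the requested indices in a second pass, instead of A's fused loop with a three-scalar
-- sliding window (fk1/fk2/fk3 rotation with a j==3 special case). Objective: simpler.

-- ===== PORT A =====
def fib_to_n (n : Int) (nums : List Int) : List (Int × Int) :=
  -- state: (fk1, fk2, fk3, itog, dict)
  let st := (PySem.List.pyRange 1 n 1).foldl
    (fun (st : Int × Int × Int × Int × PySem.Dict Int Int) j =>
      let fk1 := st.1; let fk2 := st.2.1; let fk3 := st.2.2.1; let d := st.2.2.2.2
      let s' : Int × Int × Int × Int :=
        if j ≤ 2 then (fk1, fk2, fk3, j)
        else if j = 3 then (2, 2, 1, 2)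
        else (fk1 + fk3, fk1, fk2, fk1 + fk3)
      let d' := if PySem.List.count nums j ≠ 0 then d.insert j s'.2.2.2 else d
      (s'.1, s'.2.1, s'.2.2.1, s'.2.2.2, d'))
    (0, 0, 0, 0, PySem.Dict.ofList [(0, 0)])
  st.2.2.2.2.items

-- ===== PORT B =====
def fib_to_n_alt (n : Int) (nums : List Int) : List (Int × Int) :=
  -- vals[j-1] / vals[j-3] ported with pyGetD (the indices are always in range)
  let vals := (PySem.List.pyRange 3 n 1).foldl
    (fun vs j => vs ++ [PySem.List.pyGetD vs (j - 1) 0 + PySem.List.pyGetD vs (j - 3) 0])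
    [0, 1, 2]
  let d := (PySem.List.pyRange 1 n 1).foldl
    (fun (d : PySem.Dict Int Int) j =>
      if PySem.List.count nums j ≠ 0 then d.insert j (PySem.List.pyGetD vals j 0) else d)
    (PySem.Dict.ofList [(0, 0)])
  d.items

-- ===== PRECONDITION & SPEC =====
def Spec_fib_to_n (n : Int) (nums : List Int) (out : List (Int × Int)) : Prop := out = fib_to_n_alt n nums
instance (n : Int) (nums : List Int) (out : List (Int × Int)) : Decidable (Spec_fib_to_n n nums out) := by unfold Spec_fib_to_n; infer_instance

-- ===== CLAIM (what is proved, stated in full; the proofs are below) =====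
def Claim_equal_fib_to_n : Prop := ∀ (n : Int) (nums : List Int), Dom_fib_to_n n nums → Spec_fib_to_n n nums (fib_to_n n nums)

-- ===== LEMMAS AND PROOFS =====

-- the recurrence value at index j (proof-only closed recursion)
def pvV : Nat → Int
  | 0 => 0
  | 1 => 1
  | 2 => 2
  | (k + 3) => pvV (k + 2) + pvV k
-- A's scalar update, applied to the scalar part of the state
def pvStepS (s : Int × Int × Int × Int) (j : Int) : Int × Int × Int × Int :=
  if j ≤ 2 then (s.1, s.2.1, s.2.2.1, j)
  else if j = 3 then (2, 2, 1, 2)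
  else (s.1 + s.2.2.1, s.1, s.2.1, s.1 + s.2.2.1)

-- A's scalars after processing j = 1 .. N
def pvScal : Nat → Int × Int × Int × Int
  | 0 => (0, 0, 0, 0)
  | (N + 1) => pvStepS (pvScal N) ((N : Int) + 1)

theorem pvScal_char (N : Nat) :
    pvScal (N + 3) = (pvV (N + 3), pvV (N + 2), pvV (N + 1), pvV (N + 3)) := by
  induction N with
  | zero => decide
  | succ m ih =>
    show pvStepS (pvScal (m + 3)) ((((m + 3 : Nat)) : Int) + 1) = _
    rw [ih]
    have h1 : ¬ ((((m + 3 : Nat)) : Int) + 1 ≤ 2) := by push_cast; omega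
    have h2 : ¬ ((((m + 3 : Nat)) : Int) + 1 = 3) := by push_cast; omega
    simp only [pvStepS, h1, h2, if_false]
    have : pvV (m + 1 + 3) = pvV (m + 3) + pvV (m + 1) := rfl
    simp [this]

theorem pvScal_itog (N : Nat) : (pvScal (N + 1)).2.2.2 = pvV (N + 1) := by
  match N with
  | 0 => decide
  | 1 => decide
  | (m + 2) => rw [show m + 2 + 1 = m + 3 from rfl, pvScal_char]

-- the dictionary both programs build after considering j = 1 .. N
def pvD (nums : List Int) (N : Nat) : PySem.Dict Int Int :=
  (List.range N).foldl
    (fun d (i : Nat) => if PySem.List.count nums ((1 : Int) + i) ≠ 0 then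
        d.insert ((1 : Int) + i) (pvV (i + 1)) else d)
    (PySem.Dict.ofList [(0, 0)])

theorem pvA_fold (nums : List Int) (N : Nat) :
    ((List.range N).map (fun (k : Nat) => ((1 : Int) + k))).foldl
      (fun (st : Int × Int × Int × Int × PySem.Dict Int Int) j =>
        let fk1 := st.1; let fk2 := st.2.1; let fk3 := st.2.2.1; let d := st.2.2.2.2
        let s' : Int × Int × Int × Int :=
          if j ≤ 2 then (fk1, fk2, fk3, j)
          else if j = 3 then (2, 2, 1, 2)
          else (fk1 + fk3, fk1, fk2, fk1 + fk3)
        let d' := if PySem.List.count nums j ≠ 0 then d.insert j s'.2.2.2 else d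
        (s'.1, s'.2.1, s'.2.2.1, s'.2.2.2, d'))
      (0, 0, 0, 0, PySem.Dict.ofList [(0, 0)])
    = ((pvScal N).1, (pvScal N).2.1, (pvScal N).2.2.1, (pvScal N).2.2.2, pvD nums N) := by
  induction N with
  | zero => rfl
  | succ m ih =>
    rw [List.range_succ, List.map_append, List.foldl_append, ih]
    have hstep : pvStepS (pvScal m) ((1 : Int) + m) = pvScal (m + 1) := by
      show _ = pvStepS (pvScal m) ((m : Int) + 1)
      rw [add_comm]
    have hitog : (pvScal (m + 1)).2.2.2 = pvV (m + 1) := pvScal_itog m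
    simp only [List.map_cons, List.map_nil, List.foldl_cons, List.foldl_nil]
    show (_ : Int × Int × Int × Int × PySem.Dict Int Int) = _
    simp only [pvStepS] at hstep
    rw [show pvD nums (m + 1) = (if PySem.List.count nums ((1 : Int) + m) ≠ 0 then
          (pvD nums m).insert ((1 : Int) + m) (pvV (m + 1)) else pvD nums m) from by
        simp [pvD, List.range_succ]]
    rw [← hitog, ← hstep]

theorem pvB_vals (m : Nat) :
    ((List.range m).map (fun (k : Nat) => ((3 : Int) + k))).foldl
      (fun vs j => vs ++ [PySem.List.pyGetD vs (j - 1) 0 + PySem.List.pyGetD vs (j - 3) 0])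
      [0, 1, 2]
    = (List.range (m + 3)).map pvV := by
  induction m with
  | zero => decide
  | succ k ih =>
    rw [List.range_succ, List.map_append, List.foldl_append, ih]
    simp only [List.map_cons, List.map_nil, List.foldl_cons, List.foldl_nil]
    have e1 : (3 : Int) + k - 1 = ((k + 2 : Nat) : Int) := by push_cast; ring
    have e3 : (3 : Int) + k - 3 = ((k : Nat) : Int) := by omega
    rw [e1, e3, PySem.List.pyGetD_natCast, PySem.List.pyGetD_natCast]
    rw [List.getD_eq_getElem?_getD, List.getD_eq_getElem?_getD]
    rw [List.getElem?_map, List.getElem?_map]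
    rw [List.getElem?_range (by omega : k + 2 < k + 3), List.getElem?_range (by omega : k < k + 3)]
    conv_rhs => rw [show k + 1 + 3 = (k + 3) + 1 from rfl, List.range_succ]
    have h3 : pvV (k + 3) = pvV (k + 2) + pvV k := rfl
    simp [h3]

theorem pvB_fold (nums : List Int) (M N : Nat) (h : N < M) :
    ((List.range N).map (fun (k : Nat) => ((1 : Int) + k))).foldl
      (fun (d : PySem.Dict Int Int) j =>
        if PySem.List.count nums j ≠ 0 then
          d.insert j (PySem.List.pyGetD ((List.range M).map pvV) j 0) else d)
      (PySem.Dict.ofList [(0, 0)])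
    = pvD nums N := by
  induction N with
  | zero => rfl
  | succ m ih =>
    rw [List.range_succ, List.map_append, List.foldl_append, ih (by omega)]
    simp only [List.map_cons, List.map_nil, List.foldl_cons, List.foldl_nil]
    have e : (1 : Int) + m = ((m + 1 : Nat) : Int) := by push_cast; ring
    rw [show pvD nums (m + 1) = (if PySem.List.count nums ((1 : Int) + m) ≠ 0 then
          (pvD nums m).insert ((1 : Int) + m) (pvV (m + 1)) else pvD nums m) from by
        simp [pvD, List.range_succ]]
    rw [e, PySem.List.pyGetD_natCast, List.getD_eq_getElem?_getD, List.getElem?_map,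
      List.getElem?_range (by omega : m + 1 < M)]
    rfl

-- ===== VERDICT (by name: the statement is the Claim_ definition above) =====
theorem fib_to_n_spec : Claim_equal_fib_to_n := by
  intro n nums _
  show fib_to_n n nums = fib_to_n_alt n nums
  unfold fib_to_n fib_to_n_alt
  rw [PySem.List.pyRange_one 1 n, PySem.List.pyRange_one 3 n]
  rw [pvA_fold, pvB_vals ((n - 3).toNat)]
  show (pvD nums ((n - 1).toNat)).items =
    (List.foldl
      (fun (d : PySem.Dict Int Int) j =>
        if PySem.List.count nums j ≠ 0 then
          d.insert j (PySem.List.pyGetD ((List.range ((n - 3).toNat + 3)).map pvV) j 0) else d)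
      (PySem.Dict.ofList [(0, 0)])
      ((List.range ((n - 1).toNat)).map (fun (k : Nat) => ((1 : Int) + k)))).items
  rw [pvB_fold nums ((n - 3).toNat + 3) ((n - 1).toNat) (by omega)]
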